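-- pv_equiv track=rewrite | github.com/jiminchur/BaekjoonCodingTest | 프로그래머스/1/42840. 모의고사/모의고사.py | solution
-- ===== SOURCE A (Python) =====
-- def solution(answers):
--     answer_ = []
--     student_1 = [1,2,3,4,5]*2000
--     student_1_correct = 0
--     student_2 = [2,1,2,3,2,4,2,5]*1250
--     student_2_correct = 0
--     student_3 = [3,3,1,1,2,2,4,4,5,5]*1000
--     student_3_correct = 0
--     for answer in range(len(answers)):
--         if answers[answer] == student_1[answer]:
--             student_1_correct += 1
--         if answers[answer] == student_2[answer]:
--             student_2_correct += 1
--         if answers[answer] == student_3[answer]: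
--             student_3_correct += 1
--     best_correct = max(student_1_correct,student_2_correct,student_3_correct)
--     if best_correct == student_1_correct:
--         answer_.append(1)
--     if best_correct == student_2_correct:
--         answer_.append(2)
--     if best_correct == student_3_correct:
--         answer_.append(3)
--     return answer_
-- ===== SOURCE B (Python) =====
-- def solution(answers):
--     patterns = [[1, 2, 3, 4, 5],
--                 [2, 1, 2, 3, 2, 4, 2, 5],
--                 [3, 3, 1, 1, 2, 2, 4, 4, 5, 5]]
--     # All three patterns have periods dividing 40, so behaviour only depends on
--     # the index residue mod 40: histogram the answers by (i % 40, value) once,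
--     # then score each student by summing 40 bucket lookups.
--     hist = {}
--     for i, a in enumerate(answers):
--         key = (i % 40, a)
--         hist[key] = hist.get(key, 0) + 1
--     scores = [sum(hist.get((r, p[r % len(p)]), 0) for r in range(40))
--               for p in patterns]
--     m = max(scores)
--     return [k + 1 for k, s in enumerate(scores) if s == m]
-- ===== Notes on version B (the rewrite author's own statement) =====
-- stated objective: alternative
-- what changed: Instead of comparing each answer element-wise against three (pre-tiled) answer sheets with parallel counters, B builds one histogram of answers keyed by (index mod 40, value) in a single pass and scores each student by summing 40 bucket lookups, valid because all three pattern periods divide 40.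
import Mathlib
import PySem

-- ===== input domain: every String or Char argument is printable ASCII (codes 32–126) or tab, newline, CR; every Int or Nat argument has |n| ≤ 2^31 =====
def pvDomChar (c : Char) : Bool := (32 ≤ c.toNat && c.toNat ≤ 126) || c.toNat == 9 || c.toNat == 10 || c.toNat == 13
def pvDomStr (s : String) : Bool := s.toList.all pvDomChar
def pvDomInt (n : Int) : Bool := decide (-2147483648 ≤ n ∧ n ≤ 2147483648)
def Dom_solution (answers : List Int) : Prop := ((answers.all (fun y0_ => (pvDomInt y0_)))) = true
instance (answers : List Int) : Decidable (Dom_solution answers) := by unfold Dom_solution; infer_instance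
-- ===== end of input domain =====

-- B replaces A's element-wise comparison against three pre-tiled 10000-entry answer
-- sheets by one histogram of answers keyed by (index mod 40, value), scoring each
-- student via 40 bucket lookups, since every pattern period divides 40 (objective:
-- alternative).

-- ===== PORT A =====
-- student_1 = [1,2,3,4,5]*2000, etc. (Python list repetition)
def pvSheet1 : List Int := (List.replicate 2000 ([1,2,3,4,5] : List Int)).flatten
def pvSheet2 : List Int := (List.replicate 1250 ([2,1,2,3,2,4,2,5] : List Int)).flatten
def pvSheet3 : List Int := (List.replicate 1000 ([3,3,1,1,2,2,4,4,5,5] : List Int)).flatten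

-- the loop body: the three `if`s of A's for-loop on state (c1, c2, c3);
-- pyGetD's default 0 is never used: Pre_ keeps every index in range of all four lists
def pvStepA (answers : List Int) (c : Int × Int × Int) (i : Int) : Int × Int × Int :=
  let a := PySem.List.pyGetD answers i 0
  ((if a = PySem.List.pyGetD pvSheet1 i 0 then c.1 + 1 else c.1),
   (if a = PySem.List.pyGetD pvSheet2 i 0 then c.2.1 + 1 else c.2.1),
   (if a = PySem.List.pyGetD pvSheet3 i 0 then c.2.2 + 1 else c.2.2))

def solution (answers : List Int) : List Int :=
  let st := (PySem.List.pyRange 0 (answers.length : Int)).foldl (pvStepA answers) (0, 0, 0)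
  let best := max st.1 (max st.2.1 st.2.2)
  (if best = st.1 then [1] else []) ++
  (if best = st.2.1 then [2] else []) ++
  (if best = st.2.2 then [3] else [])

-- ===== PORT B =====
-- the key (i % 40, a) of B's histogram loop
def pvKey40 (ia : Int × Int) : Int × Int := (PySem.Int.mod ia.1 40, ia.2)

-- hist[key] = hist.get(key, 0) + 1 over enumerate(answers)
def pvHist (answers : List Int) : PySem.Dict (Int × Int) Int :=
  (PySem.List.enumerate answers).foldl
    (fun d ia => d.insert (pvKey40 ia) (d.getD (pvKey40 ia) 0 + 1))
    PySem.Dict.empty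

-- sum(hist.get((r, p[r % len(p)]), 0) for r in range(40)); p[r % len(p)] is always in
-- range (len(p) > 0), so pyGetD's default 0 is never used
def pvScoreB (hist : PySem.Dict (Int × Int) Int) (p : List Int) : Int :=
  (PySem.List.pyRange 0 40).foldl
    (fun acc r => acc + hist.getD (r, PySem.List.pyGetD p (PySem.Int.mod r (p.length : Int)) 0) 0)
    0

def solution_alt (answers : List Int) : List Int :=
  let patterns : List (List Int) := [[1,2,3,4,5], [2,1,2,3,2,4,2,5], [3,3,1,1,2,2,4,4,5,5]]
  let hist := pvHist answers
  let scores := patterns.map (fun p => pvScoreB hist p)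
  let m := (PySem.List.max? scores (fun y => y)).getD 0   -- scores is nonempty: max(scores) never raises
  (PySem.List.enumerate scores).filterMap
    (fun ks => if ks.2 = m then some (ks.1 + 1) else none)

-- ===== PRECONDITION & SPEC =====
-- A raises IndexError once the loop index reaches 10000 (its pre-built sheets are
-- exhausted); Pre_ excludes exactly those over-long inputs, on which A never returns.
def Pre_solution (answers : List Int) : Prop := answers.length ≤ 10000
instance (answers : List Int) : Decidable (Pre_solution answers) := by unfold Pre_solution; infer_instance
def pvWitness_solution : List Int := [1, 3, 2, 4, 2]
def Spec_solution (answers : List Int) (out : List Int) : Prop := out = solution_alt answers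
instance (answers : List Int) (out : List Int) : Decidable (Spec_solution answers out) := by unfold Spec_solution; infer_instance

-- ===== CLAIM (what is proved, stated in full; the proofs are below) =====
def Claim_equal_solution : Prop := ∀ (answers : List Int), Dom_solution answers → Pre_solution answers → Spec_solution answers (solution answers)

-- ===== LEMMAS AND PROOFS =====

-- reading a Python-repeated list is reading the base pattern modulo its length
theorem getD_flatten_replicate (p : List Int) (k i : Nat) (h : i < k * p.length) :
    ((List.replicate k p).flatten).getD i 0 = p.getD (i % p.length) 0 := by
  induction k generalizing i with
  | zero => simp at h
  | succ k ih =>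
    rw [List.replicate_succ, List.flatten_cons]
    by_cases hi : i < p.length
    · rw [List.getD_append _ _ _ _ hi, Nat.mod_eq_of_lt hi]
    · rw [Nat.not_lt] at hi
      have hkl : (k + 1) * p.length = k * p.length + p.length := by ring
      rw [List.getD_append_right _ _ _ _ hi, ih _ (by omega), Nat.mod_eq_sub_mod hi]

-- the count a single pattern accumulates over the first n answers (Nat-side reference loop)
def pvCnt (p : List Int) (answers : List Int) (n : Nat) : Int :=
  (List.range n).foldl
    (fun acc j => acc + (if answers.getD j 0 = p.getD (j % p.length) 0 then 1 else 0)) 0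

theorem stepA_range (answers : List Int) (n : Nat) (h : n ≤ 10000) :
    (List.range n).foldl (fun c (j : Nat) => pvStepA answers c (j : Int)) ((0 : Int), (0 : Int), (0 : Int)) =
      (pvCnt [1,2,3,4,5] answers n, pvCnt [2,1,2,3,2,4,2,5] answers n,
       pvCnt [3,3,1,1,2,2,4,4,5,5] answers n) := by
  induction n with
  | zero => simp [pvCnt]
  | succ n ih =>
    rw [List.range_succ, List.foldl_append, ih (by omega)]
    simp only [pvCnt, List.range_succ, List.foldl_append, List.foldl_cons, List.foldl_nil]
    simp only [pvStepA, pvSheet1, pvSheet2, pvSheet3, PySem.List.pyGetD_natCast,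
      getD_flatten_replicate [1,2,3,4,5] 2000 n (by simpa using (by omega : n < 10000)),
      getD_flatten_replicate [2,1,2,3,2,4,2,5] 1250 n (by simpa using (by omega : n < 10000)),
      getD_flatten_replicate [3,3,1,1,2,2,4,4,5,5] 1000 n (by simpa using (by omega : n < 10000))]
    split_ifs <;> simp

-- the list of (index mod 40, value) keys B's histogram is built over
def pvKeyed (answers : List Int) : List (Int × Int) :=
  (List.range answers.length).map (fun j => (((j % 40 : Nat) : Int), answers.getD j 0))

-- B's histogram loop is the key-counting fold over the mapped key list
theorem foldl_key (l : List (Int × Int)) (d : PySem.Dict (Int × Int) Int) :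
    l.foldl (fun d ia => d.insert (pvKey40 ia) (d.getD (pvKey40 ia) 0 + 1)) d =
      (l.map pvKey40).foldl (fun d x => d.insert x (d.getD x 0 + 1)) d := by
  induction l generalizing d with
  | nil => rfl
  | cons x t ih => simp only [List.foldl_cons, List.map_cons, ih]

theorem hist_getD (answers : List Int) (k : Int × Int) :
    (pvHist answers).getD k 0 = ((pvKeyed answers).count k : Int) := by
  unfold pvHist pvKeyed
  rw [foldl_key, PySem.Dict.getD_foldl_insert_add_one,
    PySem.List.enumerate_eq_map_pyRange answers 0,
    show PySem.List.len answers = (answers.length : Int) from rfl,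
    PySem.List.pyRange_zero_natCast, List.map_map, List.map_map]
  simp [pvKey40, Function.comp_def, PySem.List.pyGetD_natCast,
    PySem.Dict.getD, PySem.Dict.get?, PySem.Dict.empty, List.getD]

-- the indicator sum over range m: exactly the term r = j can fire when j < m
theorem single_sum (m j : Nat) (hj : j < m) (a : Int) (t : Nat → Int) :
    ((List.range m).map (fun r => if j = r ∧ a = t r then (1 : Int) else 0)).sum =
      if a = t j then 1 else 0 := by
  induction m with
  | zero => omega
  | succ m ih =>
    rw [List.range_succ, List.map_append, List.sum_append]
    simp only [List.map_cons, List.map_nil, List.sum_cons, List.sum_nil, add_zero]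
    by_cases hjm : j = m
    · subst hjm
      rw [List.sum_eq_zero, zero_add]
      · simp
      · intro x hx
        simp only [List.mem_map, List.mem_range] at hx
        obtain ⟨r, hr, he⟩ := hx
        rw [if_neg (fun h => absurd h.1 (by omega))] at he
        exact he.symm
    · rw [if_neg (show ¬(j = m ∧ a = t m) from fun h => hjm h.1), add_zero]
      exact ih (by omega)

-- appending one keyed answer adds its indicator to every bucket count
theorem count_step (answers p : List Int) (n r : Nat) :
    ((List.count ((r : Int), p.getD (r % p.length) 0)
        (((List.range n).map (fun j => (((j % 40 : Nat) : Int), answers.getD j 0))) ++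
         [(((n % 40 : Nat) : Int), answers.getD n 0)]) : Nat) : Int) =
    ((List.count ((r : Int), p.getD (r % p.length) 0)
        ((List.range n).map (fun j => (((j % 40 : Nat) : Int), answers.getD j 0))) : Nat) : Int) +
    (if n % 40 = r ∧ answers.getD n 0 = p.getD (r % p.length) 0 then (1 : Int) else 0) := by
  rw [List.count_append, Nat.cast_add]
  congr 1
  simp only [List.count_cons, List.count_nil, beq_iff_eq, zero_add]
  by_cases hc : n % 40 = r ∧ answers.getD n 0 = p.getD (r % p.length) 0
  · rw [if_pos hc, if_pos (by rcases hc with ⟨h1, h2⟩; subst h1; rw [h2]), Nat.cast_one]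
  · rw [if_neg hc, if_neg, Nat.cast_zero]
    intro he
    rw [Prod.mk.injEq] at he
    exact hc ⟨Nat.cast_inj.mp he.1, he.2⟩

-- B's 40 bucket lookups over the histogram = A's per-pattern running count
theorem scoreB_eq_cnt (answers : List Int) (p : List Int)
    (hdvd : p.length ∣ 40) :
    pvScoreB (pvHist answers) p = pvCnt p answers answers.length := by
  unfold pvScoreB
  rw [show (40 : Int) = ((40 : Nat) : Int) from rfl, PySem.List.pyRange_zero_natCast,
    List.foldl_map, PySem.List.foldl_add]
  simp only [hist_getD, PySem.Int.mod_natCast, PySem.List.pyGetD_natCast, zero_add]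
  unfold pvKeyed pvCnt
  induction answers.length with
  | zero => simp
  | succ n ih =>
    rw [List.range_succ, List.map_append, List.foldl_append, List.foldl_cons,
      List.foldl_nil, ← ih]
    simp only [List.map_cons, List.map_nil]
    rw [List.map_congr_left (fun r _ => count_step answers p n r),
      PySem.List.sum_map_add_int]
    congr 1
    rw [single_sum 40 (n % 40) (by omega) _ (fun r => p.getD (r % p.length) 0),
      Nat.mod_mod_of_dvd n hdvd]

-- choosing the winners from three equal scores: A's three appends = B's filtered enumerate
theorem tail_eq (s1 s2 s3 : Int) :
    ((if max s1 (max s2 s3) = s1 then ([1] : List Int) else []) ++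
     (if max s1 (max s2 s3) = s2 then [2] else []) ++
     (if max s1 (max s2 s3) = s3 then [3] else [])) =
      (PySem.List.enumerate [s1, s2, s3]).filterMap
        (fun is => if is.2 = (PySem.List.max? [s1, s2, s3] (fun y => y)).getD 0
                   then some (is.1 + 1) else none) := by
  have hmax : (PySem.List.max? [s1, s2, s3] (fun y => y)).getD 0 = max s1 (max s2 s3) := by
    rw [PySem.List.max?_id_cons]
    simp [max_assoc]
  simp only [hmax, PySem.List.enumerate_cons, PySem.List.enumerate_nil,
    List.filterMap_cons, List.filterMap_nil]
  generalize max s1 (max s2 s3) = M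
  split_ifs <;> first | (exfalso; omega) | norm_num

-- ===== VERDICT (by name: the statement is the Claim_ definition above) =====
theorem solution_spec : Claim_equal_solution := by
  intro answers _ hpre
  unfold Spec_solution solution solution_alt
  rw [PySem.List.pyRange_zero_natCast, List.foldl_map, stepA_range answers answers.length hpre]
  simp only [List.map_cons, List.map_nil,
    scoreB_eq_cnt answers [1,2,3,4,5] (by norm_num),
    scoreB_eq_cnt answers [2,1,2,3,2,4,2,5] (by norm_num),
    scoreB_eq_cnt answers [3,3,1,1,2,2,4,4,5,5] (by norm_num)]
  exact tail_eq _ _ _
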